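-- pv_equiv track=rewrite | github.com/sandialabs/pyGSTi | packages/pygsti/tools/listtools.py | compute_occurance_indices
-- ===== SOURCE A (Python) =====
-- def compute_occurance_indices(lst):
--     """
--     Returns a 0-based list of integers specifying which occurance,
--     i.e. enumerated duplicate, each list item is.
--
--     For example, if `lst` = [ 'A','B','C','C','A'] then the
--     returned list will be   [  0 , 0 , 0 , 1 , 1 ].  This is useful
--     when working with `DataSet` objects that have `collisionAction`
--     set to "keepseparate".
--
--     Parameters
--     ----------
--     lst : list
--         The list to process.
--
--     Returns
--     -------
--     list
--     """
--     lookup = {}; ret = []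
--     for x in lst:
--         if x not in lookup:
--             lookup[x] = 0
--         else:
--             lookup[x] += 1
--         ret.append( lookup[x] )
--     return ret
-- ===== SOURCE B (Python) =====
-- def compute_occurance_indices(lst):
--     positions = {}
--     for i, x in enumerate(lst):
--         positions.setdefault(x, []).append(i)
--     return [positions[x].index(i) for i, x in enumerate(lst)]
-- ===== Notes on version B (the rewrite author's own statement) =====
-- stated objective: alternative
-- what changed: Replaces A's single pass with a running per-value counter dict by two passes: first group the indices of each value into a dict of position lists, then map each (i, x) to the rank of i in x's position list.
import Mathlib
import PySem

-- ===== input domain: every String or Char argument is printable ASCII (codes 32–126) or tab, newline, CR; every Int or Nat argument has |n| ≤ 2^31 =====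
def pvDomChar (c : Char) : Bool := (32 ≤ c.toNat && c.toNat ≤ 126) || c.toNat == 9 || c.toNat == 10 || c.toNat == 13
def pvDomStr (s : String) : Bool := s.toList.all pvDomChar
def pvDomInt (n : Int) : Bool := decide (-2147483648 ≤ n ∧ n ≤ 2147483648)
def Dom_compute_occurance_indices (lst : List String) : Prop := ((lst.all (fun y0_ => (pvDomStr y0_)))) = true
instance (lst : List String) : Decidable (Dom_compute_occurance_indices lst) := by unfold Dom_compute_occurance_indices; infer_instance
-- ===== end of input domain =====

-- B replaces A's running per-value counter with grouping each value's indices first, then ranking; objective: alternative decomposition (same results, no speed claim).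

-- ===== PORT A =====
-- one loop step of A: update the counter dict for x, append the current occurrence index
def aStep (st : PySem.Dict String Int × List Int) (x : String) : PySem.Dict String Int × List Int :=
  let lookup := if st.1.contains x = false then st.1.insert x 0       -- if x not in lookup: lookup[x] = 0
                else st.1.modify x 0 (· + 1)                          -- else: lookup[x] += 1
  (lookup, st.2 ++ [lookup.getD x 0])                                 -- ret.append(lookup[x]); x is always present here

def compute_occurance_indices (lst : List String) : List Int :=
  (lst.foldl aStep (PySem.Dict.empty, [])).2

-- ===== PORT B =====
def compute_occurance_indices_alt (lst : List String) : List Int :=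
  -- positions.setdefault(x, []).append(i) is exactly Dict.modify x [] (· ++ [i])
  -- (inserts the key at the end if absent, otherwise appends in place)
  let positions := (PySem.List.enumerate lst).foldl
      (fun d p => d.modify p.2 [] (· ++ [p.1])) PySem.Dict.empty
  -- positions[x].index(i): x is always a key and i always in its list, so the
  -- KeyError/ValueError defaults (getD) are never used
  (PySem.List.enumerate lst).map
    (fun p => (((PySem.List.index? (positions.getD p.2 []) p.1).getD 0 : Nat) : Int))

-- ===== PRECONDITION & SPEC =====
def Spec_compute_occurance_indices (lst : List String) (out : List Int) : Prop := out = compute_occurance_indices_alt lst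
instance (lst : List String) (out : List Int) : Decidable (Spec_compute_occurance_indices lst out) := by unfold Spec_compute_occurance_indices; infer_instance

-- ===== CLAIM (what is proved, stated in full; the proofs are below) =====
def Claim_equal_compute_occurance_indices : Prop := ∀ (lst : List String), Dom_compute_occurance_indices lst → Spec_compute_occurance_indices lst (compute_occurance_indices lst)

-- ===== LEMMAS AND PROOFS =====

-- canonical occurrence list: element k is the number of copies of rest[k] seen before it (pre is the already-processed prefix)
def occAux : List String → List String → List Int
  | _, [] => []
  | pre, x :: r => ((pre.count x : Int)) :: occAux (pre ++ [x]) r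

theorem occAux_getElem? (rest : List String) : ∀ (pre : List String) (k : Nat),
    (occAux pre rest)[k]? = rest[k]?.map (fun x => (((pre ++ rest.take k).count x : Nat) : Int)) := by
  induction rest with
  | nil => intro pre k; simp [occAux]
  | cons y r ih =>
    intro pre k
    cases k with
    | zero => simp [occAux]
    | succ k => simp [occAux, ih (pre ++ [y]) k, List.append_assoc]

-- invariant-carrying A loop lemma
theorem aloop (rest : List String) : ∀ (pre : List String) (lookup : PySem.Dict String Int) (ret : List Int),
    (∀ y, lookup.contains y = decide (y ∈ pre)) →
    (∀ y, lookup.getD y 0 = if y ∈ pre then (pre.count y : Int) - 1 else 0) →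
    (rest.foldl aStep (lookup, ret)).2 = ret ++ occAux pre rest := by
  induction rest with
  | nil => intro pre lookup ret hc hg; simp [occAux]
  | cons x r ih =>
    intro pre lookup ret hc hg
    rw [List.foldl_cons]
    by_cases hx : x ∈ pre
    · have hcx : lookup.contains x = true := by rw [hc x]; simp [hx]
      have hstep : aStep (lookup, ret) x = (lookup.modify x 0 (· + 1), ret ++ [((pre.count x : Nat) : Int)]) := by
        simp only [aStep, hcx]
        norm_num
        rw [hg x]
        simp [hx]
        try omega
      rw [hstep, ih (pre ++ [x]) _ _ ?_ ?_]
      · simp [occAux, List.append_assoc]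
      · intro y; rw [PySem.Dict.contains_modify, hc y]
        by_cases hyx : y = x <;> simp [hyx, hx, List.mem_append]
      · intro y; rw [PySem.Dict.getD_modify]
        by_cases hyx : y = x
        · subst hyx; rw [if_pos rfl, hg y]
          simp [hx, List.count_append]
          try omega
        · rw [if_neg hyx, hg y]
          simp [hyx, Ne.symm hyx, List.mem_append, List.count_append]
    · have hcx : lookup.contains x = false := by rw [hc x]; simp [hx]
      have hstep : aStep (lookup, ret) x = (lookup.insert x 0, ret ++ [((pre.count x : Nat) : Int)]) := by
        simp only [aStep, hcx]
        norm_num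
        simp [List.count_eq_zero_of_not_mem hx]
      rw [hstep, ih (pre ++ [x]) _ _ ?_ ?_]
      · simp [occAux, List.append_assoc]
      · intro y; rw [PySem.Dict.contains_insert, hc y]
        by_cases hyx : y = x <;> simp [hyx, List.mem_append]
      · intro y; rw [PySem.Dict.getD_insert]
        by_cases hyx : y = x
        · subst hyx; rw [if_pos rfl]
          simp [List.count_append, List.count_eq_zero_of_not_mem hx]
          try omega
        · rw [if_neg hyx, hg y]
          simp [hyx, Ne.symm hyx, List.mem_append, List.count_append]

-- the grouped index list of x equals the filtered enumeration, and the rank of s+k in it is the prior count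
theorem index_pos (x : String) (l : List String) : ∀ (s : Int) (k : Nat) (hk : k < l.length), x = l[k] →
    PySem.List.index? (((PySem.List.enumerate l s).filter (fun p => p.2 == x)).map (·.1)) (s + k)
      = some ((l.take k).count x) := by
  induction l with
  | nil => intro s k hk hx; simp at hk
  | cons y r ih =>
    intro s k hk hx
    rw [PySem.List.enumerate_cons]
    cases k with
    | zero =>
      simp only [List.getElem_cons_zero] at hx
      subst hx
      simp only [List.filter_cons, BEq.rfl, if_pos, List.map_cons]
      rw [show s + ((0 : Nat) : Int) = s by push_cast; ring, PySem.List.index?_cons_self]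
      simp
    | succ k =>
      simp only [List.getElem_cons_succ] at hx
      have hsk : s + ((k : Int) + 1) = (s + 1) + (k : Int) := by ring
      by_cases hy : y = x
      · subst hy
        simp only [List.filter_cons, beq_self_eq_true, if_pos, List.map_cons]
        push_cast
        rw [hsk, PySem.List.index?_cons_of_ne _ (show (s : Int) ≠ s + 1 + (k : Int) by omega)]
        rw [ih (s + 1) k (by simpa using hk) hx]
        simp [List.take_succ_cons, hx]
      · simp only [List.filter_cons]
        rw [if_neg (by simp [hy])]
        push_cast
        rw [hsk, ih (s + 1) k (by simpa using hk) hx]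
        simp [List.take_succ_cons, List.count_cons]
        exact hy

theorem positions_getD (lst : List String) (x : String) :
    ((PySem.List.enumerate lst).foldl (fun d p => d.modify p.2 [] (· ++ [p.1])) PySem.Dict.empty).getD x []
      = ((PySem.List.enumerate lst).filter (fun p => p.2 == x)).map (·.1) := by
  rw [← List.foldl_map (f := fun p : Int × String => (p.2, p.1))
        (g := fun (d : PySem.Dict String (List Int)) p => d.modify p.1 [] (· ++ [p.2]))]
  rw [PySem.Dict.getD_foldl_modify_append]
  simp [List.filter_map, Function.comp_def]

-- ===== VERDICT (by name: the statement is the Claim_ definition above) =====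
theorem compute_occurance_indices_spec : Claim_equal_compute_occurance_indices := by
  intro lst _
  show compute_occurance_indices lst = compute_occurance_indices_alt lst
  have hA : compute_occurance_indices lst = occAux [] lst := by
    unfold compute_occurance_indices
    rw [aloop lst [] _ _ (fun y => by simp) (fun y => by simp)]
    simp
  rw [hA]
  apply List.ext_getElem?
  intro k
  rw [occAux_getElem?]
  unfold compute_occurance_indices_alt
  rw [List.getElem?_map, PySem.List.getElem?_enumerate]
  cases h : lst[k]? with
  | none => simp
  | some x =>
    have hk : k < lst.length := by
      have := List.getElem?_eq_some_iff.mp h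
      exact this.1
    have hx : lst[k] = x := by
      have := List.getElem?_eq_some_iff.mp h
      exact this.2
    simp only [Option.map_some]
    rw [positions_getD]
    rw [index_pos x lst 0 k hk hx.symm]
    simp
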